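-- pv_equiv track=rewrite | github.com/kimyoungmin101/Algorithm | 삼성공채/경사로.py | is_true
-- ===== SOURCE A (Python) =====
-- def is_true(list_value, line):
--     visited = [False for _ in range(len(list_value))]
--
--     # 모두 같으면 True
--     A = list_value[0]
--     if list_value.count(A) == len(list_value):
--         return True
--
--     # 낮은 칸과 높은 칸의 높이 차이가 1이 아닌 경우
--     for i in range(1, len(list_value)):
--         if abs(list_value[i-1] - list_value[i]) >= 2:
--             return False
--
--     # 낮은 지점의 칸의 높이가 모두 같지 않거나, L개가 연속되지 않은 경우
--     # 경사로를 놓다가 범위를 벗어나는 경우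
--     for i in range(1, len(list_value)):
--         if list_value[i] != list_value[i-1]:
--             if list_value[i-1] < list_value[i]:
--                 if i - line < 0:
--                     return False
--
--                 value_i = list_value[i-line] # 1
--
--                 for j in range(i - line, i):
--                     if list_value[j] != value_i:
--                         return False
--                     elif visited[j] == True:
--                         return False
--                     else:
--                         visited[j] = True
--             else:
--                 if i + line > len(list_value):
--                     return False
--                 else:
--                     value_i = list_value[i]
--                     for j in range(i, i+line):
--                         if list_value[j] != value_i:
--                             return False
--                         else:
--                             visited[j] = True
--
--     return True
-- ===== SOURCE B (Python) =====
-- def is_true(list_value, line):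
--     # Single pass over adjacent pairs with incremental flat-run length (run)
--     # and pending descending-ramp demand (pend); no visited array, no inner loops.
--     run, pend = 1, 0
--     for prev, cur in zip(list_value, list_value[1:]):
--         d = cur - prev
--         if d > 1 or d < -1:
--             return False
--         if d == 0:
--             run += 1
--         elif d == 1:
--             if run < pend + line:
--                 return False
--             run, pend = 1, 0
--         else:
--             if run < pend:
--                 return False
--             run, pend = 1, line
--     return run >= pend
-- ===== Notes on version B (the rewrite author's own statement) =====
-- stated objective: faster
-- what changed: B drops A's visited array, its count/diff pre-passes and its O(line)-long inner ramp loops, and instead makes one pass over adjacent pairs keeping two counters (current flat-run length and the pending cell demand of the last descending ramp).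
import Mathlib
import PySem

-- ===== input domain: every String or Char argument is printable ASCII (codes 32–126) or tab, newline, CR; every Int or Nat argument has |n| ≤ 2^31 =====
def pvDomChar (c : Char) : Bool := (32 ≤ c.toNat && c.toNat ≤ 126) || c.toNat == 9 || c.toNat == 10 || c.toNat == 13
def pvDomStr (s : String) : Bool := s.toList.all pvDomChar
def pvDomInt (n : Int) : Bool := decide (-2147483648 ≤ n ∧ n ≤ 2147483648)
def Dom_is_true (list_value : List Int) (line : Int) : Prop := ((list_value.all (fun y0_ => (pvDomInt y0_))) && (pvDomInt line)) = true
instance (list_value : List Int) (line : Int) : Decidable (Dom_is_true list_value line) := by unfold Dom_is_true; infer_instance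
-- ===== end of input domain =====

-- B replaces A's visited array and O(L) inner ramp loops by one pass over adjacent pairs with
-- two counters (flat-run length, pending descending-ramp demand); objective: faster (O(n) vs O(n·L)).

-- ===== PORT A =====
-- for i in range(1, len): if abs(lv[i-1]-lv[i]) >= 2: return False   (indices are provably in range, so List.getD is exact)
def pvA_diffLoop (lv : List Int) (i : Nat) : Bool :=
  if _h : i < lv.length then
    if 2 ≤ (lv.getD (i-1) 0 - lv.getD i 0).natAbs then false
    else pvA_diffLoop lv (i+1)
  else true
termination_by lv.length - i

-- inner loop of the ascending-ramp branch: for j in range(i-line, i) (none = return False)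
def pvA_asc (lv : List Int) (vi : Int) (i j : Nat) (visited : List Bool) : Option (List Bool) :=
  if _h : j < i then
    if lv.getD j 0 ≠ vi then none
    else if visited.getD j false then none
    else pvA_asc lv vi i (j+1) (visited.set j true)
  else some visited
termination_by i - j

-- inner loop of the descending-ramp branch: for j in range(i, i+line)
def pvA_desc (lv : List Int) (vi : Int) (stop j : Nat) (visited : List Bool) : Option (List Bool) :=
  if _h : j < stop then
    if lv.getD j 0 ≠ vi then none
    else pvA_desc lv vi stop (j+1) (visited.set j true)
  else some visited
termination_by stop - j

-- main loop: for i in range(1, len): …  (list_value[i-line] is ported with PySem.List.pyGetD: its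
-- out-of-range default stands for Python's IndexError, which Pre_is_true excludes)
def pvA_main (lv : List Int) (line : Int) (i : Nat) (visited : List Bool) : Bool :=
  if _h : i < lv.length then
    if lv.getD i 0 ≠ lv.getD (i-1) 0 then
      if lv.getD (i-1) 0 < lv.getD i 0 then
        if (i : Int) - line < 0 then false
        else
          match pvA_asc lv (PySem.List.pyGetD lv ((i : Int) - line) 0) i ((i : Int) - line).toNat visited with
          | none => false
          | some v' => pvA_main lv line (i+1) v'
      else
        if (i : Int) + line > (lv.length : Int) then false
        else
          match pvA_desc lv (lv.getD i 0) ((i : Int) + line).toNat i visited with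
          | none => false
          | some v' => pvA_main lv line (i+1) v'
    else pvA_main lv line (i+1) visited
  else true
termination_by lv.length - i

def is_true (list_value : List Int) (line : Int) : Bool :=
  match PySem.List.pyGet? list_value 0 with
  | none => false   -- IndexError on the empty list; excluded by Pre_is_true
  | some a0 =>
    if PySem.List.count list_value a0 = list_value.length then true
    else if pvA_diffLoop list_value 1 = false then false
    else pvA_main list_value line 1 (List.replicate list_value.length false)

-- ===== PORT B =====
-- single pass over zip(lv, lv[1:]): run = current flat-run length, pend = cells the last
-- descending ramp still claims at the current height
def pvB_loop (line run pend : Int) (prev : Int) : List Int → Bool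
  | [] => decide (pend ≤ run)              -- return run >= pend
  | cur :: rest =>
    let d := cur - prev
    if 1 < d ∨ d < -1 then false
    else if d = 0 then pvB_loop line (run+1) pend cur rest
    else if d = 1 then
      if run < pend + line then false else pvB_loop line 1 0 cur rest
    else
      if run < pend then false else pvB_loop line 1 line cur rest

def is_true_alt (list_value : List Int) (line : Int) : Bool :=
  match list_value with
  | [] => decide ((0:Int) ≤ 1)             -- empty zip: return 1 >= 0
  | x :: rest => pvB_loop line 1 0 x rest

-- ===== PRECONDITION & SPEC =====
-- Pre_is_true excludes exactly the inputs on which the Python A raises IndexError: the empty list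
-- (list_value[0]), and a negative line on a non-constant step-wise-±1 list that has a rise at some
-- index i with i - line ≥ len(list_value) (then list_value[i-line] is read).  On every other input
-- A returns normally.
def Pre_is_true (list_value : List Int) (line : Int) : Prop :=
  list_value ≠ [] ∧
    (0 ≤ line ∨
     (∀ x ∈ list_value, x = list_value.getD 0 0) ∨
     (∃ i < list_value.length, 0 < i ∧ 2 ≤ (list_value.getD (i-1) 0 - list_value.getD i 0).natAbs) ∨
     ¬ ∃ i < list_value.length, 0 < i ∧ list_value.getD (i-1) 0 < list_value.getD i 0 ∧
         (list_value.length : Int) ≤ (i : Int) - line)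
instance (list_value : List Int) (line : Int) : Decidable (Pre_is_true list_value line) := by
  unfold Pre_is_true; infer_instance
def pvWitness_is_true : List Int × Int := ([2, 2, 1, 1, 2], 2)

def Spec_is_true (list_value : List Int) (line : Int) (out : Bool) : Prop := out = is_true_alt list_value line
instance (list_value : List Int) (line : Int) (out : Bool) : Decidable (Spec_is_true list_value line out) := by unfold Spec_is_true; infer_instance

-- ===== CLAIM (what is proved, stated in full; the proofs are below) =====
def Claim_equal_is_true : Prop := ∀ (list_value : List Int) (line : Int), Dom_is_true list_value line → Pre_is_true list_value line → Spec_is_true list_value line (is_true list_value line)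

-- ===== LEMMAS AND PROOFS =====

theorem pv_getD_set_self {l : List Bool} {n : Nat} (h : n < l.length) :
    (l.set n true).getD n false = true := by
  simp [List.getD_eq_getElem?_getD, h]

theorem pv_getD_set_ne {l : List Bool} {n m : Nat} (h : m ≠ n) :
    (l.set n true).getD m false = l.getD m false := by
  simp [List.getD_eq_getElem?_getD, List.getElem?_set, Ne.symm h]

theorem pv_getD_replicate (n j : Nat) : (List.replicate n false).getD j false = false := by
  simp [List.getD_eq_getElem?_getD, List.getElem?_replicate]
  split <;> simp

-- A's second loop returns true iff no adjacent difference of 2 or more occurs from index i on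
theorem pvA_diffLoop_iff (lv : List Int) (i : Nat) :
    pvA_diffLoop lv i = true ↔
      ∀ j, i ≤ j → j < lv.length → (lv.getD (j-1) 0 - lv.getD j 0).natAbs ≤ 1 := by
  fun_induction pvA_diffLoop lv i with
  | case1 i h hbig =>
      simp only [Bool.false_eq_true, false_iff]
      push_neg
      exact ⟨i, le_refl i, h, by omega⟩
  | case2 i h hbig ih =>
      rw [ih]
      constructor
      · intro hall j hij hj
        rcases Nat.eq_or_lt_of_le hij with rfl | h'
        · omega
        · exact hall j h' hj
      · intro hall j hij hj
        exact hall j (by omega) hj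
  | case3 i h =>
      simp only [true_iff]
      intro j hij hj
      omega

-- the ascending inner loop fails when some cell in range has the wrong height
theorem pvA_asc_fail (lv : List Int) (vi : Int) (i j : Nat) (visited : List Bool) :
    (∃ k, j ≤ k ∧ k < i ∧ lv.getD k 0 ≠ vi) → pvA_asc lv vi i j visited = none := by
  fun_induction pvA_asc lv vi i j visited with
  | case1 j visited h hne => intro _; rfl
  | case2 j visited h hne hvis => intro _; rfl
  | case3 j visited h hne hvis ih =>
      rintro ⟨k, hjk, hki, hkne⟩
      refine ih ⟨k, ?_, hki, hkne⟩
      rcases Nat.eq_or_lt_of_le hjk with rfl | h'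
      · simp at hne; exact absurd hne hkne
      · omega
  | case4 j visited h => rintro ⟨k, hjk, hki, _⟩; omega

-- the ascending inner loop succeeds when all cells in range are right and unvisited,
-- and then marks exactly the cells of the range
theorem pvA_asc_ok (lv : List Int) (vi : Int) (i j : Nat) (visited : List Bool) :
    (∀ k, j ≤ k → k < i → lv.getD k 0 = vi ∧ visited.getD k false = false) →
    ∃ v', pvA_asc lv vi i j visited = some v' ∧
      v'.length = visited.length ∧
      (∀ k, k < j ∨ i ≤ k → v'.getD k false = visited.getD k false) ∧
      (∀ k, j ≤ k → k < i → k < visited.length → v'.getD k false = true) := by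
  fun_induction pvA_asc lv vi i j visited with
  | case1 j visited h hne =>
      intro hgood; exact absurd (hgood j (le_refl j) h).1 hne
  | case2 j visited h hne hvis =>
      intro hgood
      have := (hgood j (le_refl j) h).2
      simp at hvis
      exact absurd this (by simp [hvis])
  | case3 j visited h hne hvis ih =>
      intro hgood
      have hjlen : j < visited.length ∨ visited.length ≤ j := by omega
      obtain ⟨v', heq, hlen, hsame, htrue⟩ := ih (by
        intro k hk1 hk2
        refine ⟨(hgood k (by omega) hk2).1, ?_⟩
        rw [pv_getD_set_ne (by omega)]
        exact (hgood k (by omega) hk2).2)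
      refine ⟨v', heq, by simpa using hlen, ?_, ?_⟩
      · intro k hk
        rw [hsame k (by omega), pv_getD_set_ne (by omega)]
      · intro k hk1 hk2 hk3
        rcases Nat.eq_or_lt_of_le hk1 with rfl | h'
        · rw [hsame _ (by omega)]
          exact pv_getD_set_self (by omega)
        · exact htrue _ (by omega) hk2 (by simpa using hk3)
  | case4 j visited h =>
      intro _
      exact ⟨visited, rfl, rfl, fun k _ => rfl, fun k hk1 hk2 _ => by omega⟩

theorem pvA_asc_ge (lv : List Int) (vi : Int) (i j : Nat) (visited : List Bool) (h : i ≤ j) :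
    pvA_asc lv vi i j visited = some visited := by
  rw [pvA_asc, dif_neg (by omega)]

-- same two facts for the descending inner loop
theorem pvA_desc_fail (lv : List Int) (vi : Int) (stop j : Nat) (visited : List Bool) :
    (∃ k, j ≤ k ∧ k < stop ∧ lv.getD k 0 ≠ vi) → pvA_desc lv vi stop j visited = none := by
  fun_induction pvA_desc lv vi stop j visited with
  | case1 j visited h hne => intro _; rfl
  | case2 j visited h hne ih =>
      rintro ⟨k, hjk, hki, hkne⟩
      refine ih ⟨k, ?_, hki, hkne⟩
      rcases Nat.eq_or_lt_of_le hjk with rfl | h'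
      · simp at hne; exact absurd hne hkne
      · omega
  | case3 j visited h => rintro ⟨k, hjk, hki, _⟩; omega

theorem pvA_desc_ok (lv : List Int) (vi : Int) (stop j : Nat) (visited : List Bool) :
    (∀ k, j ≤ k → k < stop → lv.getD k 0 = vi) →
    ∃ v', pvA_desc lv vi stop j visited = some v' ∧
      v'.length = visited.length ∧
      (∀ k, k < j ∨ stop ≤ k → v'.getD k false = visited.getD k false) ∧
      (∀ k, j ≤ k → k < stop → k < visited.length → v'.getD k false = true) := by
  fun_induction pvA_desc lv vi stop j visited with
  | case1 j visited h hne =>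
      intro hgood; exact absurd (hgood j (le_refl j) h) hne
  | case2 j visited h hne ih =>
      intro hgood
      obtain ⟨v', heq, hlen, hsame, htrue⟩ := ih (fun k hk1 hk2 => hgood k (by omega) hk2)
      refine ⟨v', heq, by simpa using hlen, ?_, ?_⟩
      · intro k hk
        rw [hsame k (by omega), pv_getD_set_ne (by omega)]
      · intro k hk1 hk2 hk3
        rcases Nat.eq_or_lt_of_le hk1 with rfl | h'
        · rw [hsame _ (by omega)]
          exact pv_getD_set_self (by omega)
        · exact htrue _ (by omega) hk2 (by simpa using hk3)
  | case3 j visited h =>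
      intro _
      exact ⟨visited, rfl, rfl, fun k _ => rfl, fun k hk1 hk2 _ => by omega⟩

theorem pvA_desc_ge (lv : List Int) (vi : Int) (stop j : Nat) (visited : List Bool) (h : stop ≤ j) :
    pvA_desc lv vi stop j visited = some visited := by
  rw [pvA_desc, dif_neg (by omega)]

-- one-step reductions of B's loop
theorem pvB_step_flat (line run pend prev cur : Int) (rest : List Int) (h : cur - prev = 0) :
    pvB_loop line run pend prev (cur :: rest) = pvB_loop line (run+1) pend cur rest := by
  simp only [pvB_loop]
  rw [if_neg (by omega), if_pos h]

theorem pvB_step_up (line run pend prev cur : Int) (rest : List Int) (h : cur - prev = 1) :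
    pvB_loop line run pend prev (cur :: rest) =
      if run < pend + line then false else pvB_loop line 1 0 cur rest := by
  simp only [pvB_loop]
  rw [if_neg (by omega), if_neg (by omega), if_pos h]

theorem pvB_step_down (line run pend prev cur : Int) (rest : List Int) (h : cur - prev = -1) :
    pvB_loop line run pend prev (cur :: rest) =
      if run < pend then false else pvB_loop line 1 line cur rest := by
  simp only [pvB_loop]
  rw [if_neg (by omega), if_neg (by omega), if_neg (by omega)]

-- B returns true on an all-flat tail once the pending demand is met
theorem pvB_loop_allEq (line : Int) (rest : List Int) : ∀ (prev run pend : Int),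
    (∀ x ∈ rest, x = prev) → pend ≤ run → pvB_loop line run pend prev rest = true := by
  induction rest with
  | nil =>
      intro prev run pend _ hpr
      simpa [pvB_loop] using hpr
  | cons cur rest ih =>
      intro prev run pend hall hpr
      have hc : cur - prev = 0 := by
        have := hall cur (by simp); omega
      rw [pvB_step_flat _ _ _ _ _ _ hc]
      exact ih cur (run+1) pend (fun x hx => by
        have h1 := hall x (by simp [hx]); have h2 := hall cur (by simp); omega) (by omega)

-- B returns false when the pending demand exceeds run plus the flat cells still ahead
theorem pvB_loop_doom (line : Int) (hline : 0 ≤ line) (rest : List Int) : ∀ (prev run pend : Int),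
    run + (((rest.takeWhile (fun x => x == prev)).length : Int)) < pend →
    pvB_loop line run pend prev rest = false := by
  induction rest with
  | nil =>
      intro prev run pend h
      simp only [List.takeWhile_nil, List.length_nil, Nat.cast_zero, add_zero] at h
      simp [pvB_loop]; omega
  | cons cur rest ih =>
      intro prev run pend h
      by_cases hc : cur = prev
      · rw [List.takeWhile_cons, if_pos (by simp [hc])] at h
        rw [pvB_step_flat _ _ _ _ _ _ (by omega)]
        refine ih cur (run+1) pend ?_
        subst hc
        simp only [List.length_cons] at h
        push_cast at h ⊢
        omega
      · rw [List.takeWhile_cons, if_neg (by simp [hc])] at h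
        simp only [List.length_nil, Nat.cast_zero, add_zero] at h
        by_cases hbig : 1 < cur - prev ∨ cur - prev < -1
        · simp only [pvB_loop]
          rw [if_pos hbig]
        · have hd1 : cur - prev = 1 ∨ cur - prev = -1 := by
            rcases eq_or_ne cur prev with he | he
            · exact absurd he hc
            · omega
          rcases hd1 with hd1 | hd1
          · rw [pvB_step_up _ _ _ _ _ _ hd1, if_pos (by omega)]
          · rw [pvB_step_down _ _ _ _ _ _ hd1, if_pos (by omega)]

-- B returns false when some later adjacent difference is 2 or more
theorem pvB_loop_chain_false (line : Int) (rest : List Int) : ∀ (prev run pend : Int),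
    ¬ List.IsChain (fun a b => (b - a).natAbs ≤ 1) (prev :: rest) →
    pvB_loop line run pend prev rest = false := by
  induction rest with
  | nil => intro prev run pend h; exact absurd (by simp) h
  | cons cur rest ih =>
      intro prev run pend h
      rw [List.isChain_cons_cons] at h
      by_cases hd : (cur - prev).natAbs ≤ 1
      · have h2 : ¬ List.IsChain (fun a b => (b - a).natAbs ≤ 1) (cur :: rest) := by tauto
        rcases (by omega : cur - prev = 0 ∨ cur - prev = 1 ∨ cur - prev = -1) with hd1 | hd1 | hd1
        · rw [pvB_step_flat _ _ _ _ _ _ hd1]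
          exact ih cur (run+1) pend h2
        · rw [pvB_step_up _ _ _ _ _ _ hd1]
          split_ifs
          · rfl
          · exact ih cur 1 0 h2
        · rw [pvB_step_down _ _ _ _ _ _ hd1]
          split_ifs
          · rfl
          · exact ih cur 1 line h2
      · simp only [pvB_loop]
        rw [if_pos (by omega)]

-- with a negative line no ramp can fail in B: the loop returns true on a step-wise chain
theorem pvB_loop_neg (line : Int) (hline : line < 0) (rest : List Int) : ∀ (prev run pend : Int),
    pend ≤ 0 → 1 ≤ run →
    List.IsChain (fun a b => (b - a).natAbs ≤ 1) (prev :: rest) →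
    pvB_loop line run pend prev rest = true := by
  induction rest with
  | nil =>
      intro prev run pend hp hr _
      simp [pvB_loop]; omega
  | cons cur rest ih =>
      intro prev run pend hp hr hch
      rw [List.isChain_cons_cons] at hch
      obtain ⟨hd, hch⟩ := hch
      rcases (by omega : cur - prev = 0 ∨ cur - prev = 1 ∨ cur - prev = -1) with hd1 | hd1 | hd1
      · rw [pvB_step_flat _ _ _ _ _ _ hd1]
        exact ih cur (run+1) pend hp (by omega) hch
      · rw [pvB_step_up _ _ _ _ _ _ hd1, if_neg (by omega)]
        exact ih cur 1 0 (le_refl 0) (by omega) hch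
      · rw [pvB_step_down _ _ _ _ _ _ hd1, if_neg (by omega)]
        exact ih cur 1 line (by omega) (by omega) hch

-- with a negative line no ramp can fail in A's main loop either (all inner ranges are empty)
theorem pvA_main_neg (lv : List Int) (line : Int) (hline : line < 0) (i : Nat) (visited : List Bool) :
    pvA_main lv line i visited = true := by
  fun_induction pvA_main lv line i visited with
  | case1 i visited h hne hlt hneg => omega
  | case2 i visited h hne hlt hneg heq =>
      exact absurd (heq ▸ pvA_asc_ge lv _ i _ visited (by omega)) (by simp)
  | case3 i visited h hne hlt hneg v' heq ih => exact ih
  | case4 i visited h hne hlt hof =>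
      push_neg at hlt
      omega
  | case5 i visited h hne hlt hof heq =>
      exact absurd (heq ▸ pvA_desc_ge lv _ _ i visited (by omega)) (by simp)
  | case6 i visited h hne hlt hof v' heq ih => exact ih
  | case7 i visited h hne ih => exact ih
  | case8 i visited h => rfl

-- chain form of the no-big-difference condition, in getD terms
theorem pv_chain_iff (lv : List Int) :
    List.IsChain (fun a b => (b - a).natAbs ≤ 1) lv ↔
      ∀ j, 0 < j → j < lv.length → (lv.getD (j-1) 0 - lv.getD j 0).natAbs ≤ 1 := by
  rw [List.isChain_iff_getElem]
  constructor
  · intro h j hj0 hj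
    have h2 : ∀ (i : Nat), i + 1 < lv.length → (lv.getD (i+1) 0 - lv.getD i 0).natAbs ≤ 1 := by
      intro i hi
      have h3 := h i hi
      rw [List.getD_eq_getElem _ _ (by omega), List.getD_eq_getElem _ _ (by omega)]
      exact h3
    have h4 := h2 (j-1) (by omega)
    have he : j - 1 + 1 = j := by omega
    rw [he] at h4
    omega
  · intro h k hk
    have h2 := h (k+1) (by omega) (by omega)
    have he : k + 1 - 1 = k := by omega
    rw [he] at h2
    rw [← List.getD_eq_getElem lv 0 (by omega : k + 1 < lv.length),
        ← List.getD_eq_getElem lv 0 (by omega : k < lv.length)]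
    omega

-- cells inside the takeWhile prefix of a drop all have the reference height
theorem pv_takeWhile_lt (lv : List Int) (c : Int) (m k : Nat)
    (h : k < ((lv.drop m).takeWhile (fun x => x == c)).length) :
    lv.getD (m + k) 0 = c := by
  have hk2 : k < (lv.drop m).length := lt_of_lt_of_le h (((lv.drop m).takeWhile_sublist _).length_le)
  have hmk : m + k < lv.length := by
    rw [List.length_drop] at hk2; omega
  have h1 : ((lv.drop m).takeWhile (fun x => x == c))[k] = (lv.drop m)[k]'hk2 :=
    ((lv.drop m).takeWhile_prefix _).getElem h
  have h3 := List.mem_takeWhile_imp (List.getElem_mem h)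
  rw [h1] at h3
  rw [List.getElem_drop] at h3
  simp only [beq_iff_eq] at h3
  rw [List.getD_eq_getElem _ _ hmk]
  exact h3

-- terminal case of the main-loop correspondence
theorem pvMain_end (lv : List Int) (line : Int) (i s : Nat) (pend : Int) (visited : List Bool)
    (hi : lv.length ≤ i) (_hsi : s < i) (hle : pend ≤ (i:Int) - (s:Int)) :
    pvA_main lv line i visited = pvB_loop line ((i:Int) - (s:Int)) pend (lv.getD (i-1) 0) (lv.drop i) := by
  rw [pvA_main, dif_neg (by omega), List.drop_eq_nil_of_le hi]
  simp only [pvB_loop]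
  symm
  simpa using hle

-- the heart of the equivalence: A's main loop with its visited array equals B's counter loop,
-- related by the invariant: s = start of the current flat run, run = i - s, pend = cells the
-- descending ramp entering the run still claims, visited true exactly on [s, s+pend)
theorem pvMain (lv : List Int) (line : Int) (hline : 0 ≤ line)
    (hdiff : ∀ j : Nat, 0 < j → j < lv.length → (lv.getD (j-1) 0 - lv.getD j 0).natAbs ≤ 1) :
    ∀ (fuel i s : Nat) (pend : Int) (visited : List Bool),
      lv.length ≤ i + fuel →
      0 < i → s < i → i ≤ lv.length →
      (∀ j : Nat, s ≤ j → j < i → lv.getD j 0 = lv.getD s 0) →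
      (s = 0 ∨ lv.getD (s-1) 0 ≠ lv.getD s 0) →
      visited.length = lv.length →
      ((pend = 0 ∧ ¬ (0 < s ∧ lv.getD s 0 < lv.getD (s-1) 0)) ∨
       (pend = line ∧ 0 < s ∧ lv.getD s 0 < lv.getD (s-1) 0 ∧
        (s:Int) + line ≤ (lv.length : Int) ∧
        (∀ j : Nat, s ≤ j → (j:Int) < (s:Int) + line → lv.getD j 0 = lv.getD s 0))) →
      (∀ j : Nat, (s:Int) + pend ≤ (j:Int) → visited.getD j false = false) →
      (∀ j : Nat, s ≤ j → (j:Int) < (s:Int) + pend → visited.getD j false = true) →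
      pvA_main lv line i visited =
        pvB_loop line ((i:Int) - (s:Int)) pend (lv.getD (i-1) 0) (lv.drop i) := by
  intro fuel
  induction fuel with
  | zero =>
      intro i s pend visited hfuel h0i hsi hin h2 h3 hlen h5 h6 h7
      refine pvMain_end lv line i s pend visited (by omega) hsi ?_
      rcases h5 with ⟨hp, _⟩ | ⟨hp, _, _, hsl, _⟩ <;> omega
  | succ fuel ih =>
      intro i s pend visited hfuel h0i hsi hin h2 h3 hlen h5 h6 h7
      by_cases hi : i < lv.length
      case neg =>
        refine pvMain_end lv line i s pend visited (by omega) hsi ?_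
        rcases h5 with ⟨hp, _⟩ | ⟨hp, _, _, hsl, _⟩ <;> omega
      case pos =>
      have hpge : 0 ≤ pend := by rcases h5 with ⟨hp, _⟩ | ⟨hp, _⟩ <;> omega
      have hprev : lv.getD (i-1) 0 = lv.getD s 0 := h2 (i-1) (by omega) (by omega)
      have hdi : (lv.getD s 0 - lv.getD i 0).natAbs ≤ 1 := by
        have hh := hdiff i h0i hi
        rwa [hprev] at hh
      have hdrop : lv.drop i = lv.getD i 0 :: lv.drop (i+1) := by
        rw [List.drop_eq_getElem_cons hi, List.getD_eq_getElem _ _ hi]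
      rw [pvA_main, dif_pos hi, hdrop]
      rcases lt_trichotomy (lv.getD i 0) (lv.getD s 0) with hdown | hflat | hup
      · -- descending boundary
        have hc1 : lv.getD i 0 ≠ lv.getD (i-1) 0 := by rw [hprev]; omega
        have hc2 : ¬ (lv.getD (i-1) 0 < lv.getD i 0) := by rw [hprev]; omega
        have hc3 : lv.getD i 0 - lv.getD (i-1) 0 = -1 := by rw [hprev]; omega
        rw [if_pos hc1, if_neg hc2, pvB_step_down _ _ _ _ _ _ hc3]
        -- the run always satisfies the pending demand here
        have hrp : ¬ ((i:Int) - (s:Int) < pend) := by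
          rcases h5 with ⟨hp, _⟩ | ⟨hp, _, _, _, hval⟩
          · omega
          · by_contra hcon
            have := hval i (by omega) (by omega)
            omega
        rw [if_neg hrp]
        by_cases hof : (i:Int) + line > (lv.length : Int)
        · rw [if_pos hof]
          symm
          refine pvB_loop_doom line hline _ _ _ _ ?_
          have hlen2 : ((lv.drop (i+1)).takeWhile (fun x => x == lv.getD i 0)).length
              ≤ lv.length - (i+1) := by
            have := ((lv.drop (i+1)).takeWhile_sublist (fun x => x == lv.getD i 0)).length_le
            rw [List.length_drop] at this
            omega
          omega
        · rw [if_neg hof]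
          push_neg at hof
          have hstopnn : (0:Int) ≤ (i:Int) + line := by omega
          have hstopc : ((((i:Int) + line).toNat : Nat) : Int) = (i:Int) + line :=
            Int.toNat_of_nonneg hstopnn
          by_cases hall : ∀ k, i ≤ k → k < ((i:Int) + line).toNat → lv.getD k 0 = lv.getD i 0
          · obtain ⟨v', heq, hvlen, hsame, htrue⟩ :=
              pvA_desc_ok lv (lv.getD i 0) (((i:Int) + line).toNat) i visited hall
            rw [heq]
            have hrec := ih (i+1) i line v' (by omega) (by omega) (by omega) (by omega)
              (by intro j hj1 hj2; have : j = i := by omega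
                  rw [this])
              (by right; rw [hprev]; omega)
              (by rw [hvlen, hlen])
              (by right
                  refine ⟨rfl, by omega, by rw [hprev]; omega, by omega, ?_⟩
                  intro j hj1 hj2
                  exact hall j hj1 (by omega))
              (by intro j hj
                  rw [hsame j (by right; omega)]
                  refine h6 j ?_
                  omega)
              (by intro j hj1 hj2
                  refine htrue j hj1 (by omega) ?_
                  rw [hlen]; omega)
            show pvA_main lv line (i+1) v' = _
            rw [hrec]
            have e1 : ((i+1 : Nat) : Int) - (i : Int) = 1 := by push_cast; ring
            have e2 : i + 1 - 1 = i := by omega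
            rw [e1, e2]
          · push_neg at hall
            obtain ⟨k, hk1, hk2, hk3⟩ := hall
            rw [pvA_desc_fail lv (lv.getD i 0) (((i:Int) + line).toNat) i visited ⟨k, hk1, hk2, hk3⟩]
            symm
            refine pvB_loop_doom line hline _ _ _ _ ?_
            -- the flat run from i is shorter than line
            have hki : i < k := by
              rcases Nat.eq_or_lt_of_le hk1 with rfl | h'
              · exact absurd rfl hk3
              · exact h'
            have htw : ((lv.drop (i+1)).takeWhile (fun x => x == lv.getD i 0)).length ≤ k - (i+1) := by
              by_contra hcon
              have hcon2 : k - (i+1) < ((lv.drop (i+1)).takeWhile (fun x => x == lv.getD i 0)).length := by omega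
              have := pv_takeWhile_lt lv (lv.getD i 0) (i+1) (k - (i+1)) hcon2
              have hkk : i + 1 + (k - (i+1)) = k := by omega
              rw [hkk] at this
              exact hk3 this
            omega
      · -- flat
        have hc1 : ¬ (lv.getD i 0 ≠ lv.getD (i-1) 0) := by rw [hprev]; omega
        have hc3 : lv.getD i 0 - lv.getD (i-1) 0 = 0 := by rw [hprev]; omega
        rw [if_neg hc1, pvB_step_flat _ _ _ _ _ _ hc3]
        have hrec := ih (i+1) s pend visited (by omega) (by omega) (by omega) (by omega)
          (by intro j hj1 hj2
              rcases Nat.lt_or_ge j i with h' | h'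
              · exact h2 j hj1 h'
              · have : j = i := by omega
                rw [this, hflat])
          h3 hlen h5 h6 h7
        rw [hrec]
        have e1 : ((i+1 : Nat) : Int) - (s : Int) = ((i:Int) - (s:Int)) + 1 := by push_cast; ring
        have e2 : i + 1 - 1 = i := by omega
        rw [e1, e2]
      · -- ascending boundary
        have hc1 : lv.getD i 0 ≠ lv.getD (i-1) 0 := by rw [hprev]; omega
        have hc2 : lv.getD (i-1) 0 < lv.getD i 0 := by rw [hprev]; omega
        have hc3 : lv.getD i 0 - lv.getD (i-1) 0 = 1 := by rw [hprev]; omega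
        rw [if_pos hc1, if_pos hc2, pvB_step_up _ _ _ _ _ _ hc3]
        by_cases hBfail : (i:Int) - (s:Int) < pend + line
        · rw [if_pos hBfail]
          by_cases hneg : (i:Int) - line < 0
          · rw [if_pos hneg]
          · rw [if_neg hneg]
            push_neg at hneg
            have hjc : ((((i:Int) - line).toNat : Nat) : Int) = (i:Int) - line :=
              Int.toNat_of_nonneg hneg
            by_cases hjs : ((i:Int) - line).toNat < s
            · have hs0 : 0 < s := by omega
              have h3' : lv.getD (s-1) 0 ≠ lv.getD s 0 := by
                rcases h3 with h3 | h3
                · omega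
                · exact h3
              rw [pvA_asc_fail lv _ i _ visited ?_]
              by_cases hvic : PySem.List.pyGetD lv ((i:Int) - line) 0 = lv.getD s 0
              · exact ⟨s-1, by omega, by omega, by rw [hvic]; exact h3'⟩
              · refine ⟨i-1, by omega, by omega, ?_⟩
                rw [hprev]
                exact fun he => hvic he.symm
            · -- s ≤ jstart < s + pend: the first cell read is already visited
              push_neg at hjs
              have hpl : pend = line := by
                rcases h5 with ⟨hp, _⟩ | ⟨hp, _⟩
                · omega
                · exact hp
              have hlpos : 0 < line := by omega
              have hji : ((i:Int) - line).toNat < i := by omega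
              have hvi : PySem.List.pyGetD lv ((i:Int) - line) 0 = lv.getD (((i:Int) - line).toNat) 0 := by
                rw [PySem.List.pyGetD_eq_getElem lv 0 hneg (by push_cast; omega),
                    List.getD_eq_getElem _ _ (by omega)]
              rw [pvA_asc, dif_pos hji, if_neg (by rw [hvi]; simp),
                  if_pos (h7 (((i:Int) - line).toNat) (by omega) (by omega))]
        · rw [if_neg hBfail]
          push_neg at hBfail
          have hneg : ¬ ((i:Int) - line < 0) := by omega
          rw [if_neg hneg]
          have hjc : ((((i:Int) - line).toNat : Nat) : Int) = (i:Int) - line :=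
            Int.toNat_of_nonneg (by omega)
          have hvi : ∀ k, ((i:Int) - line).toNat ≤ k → k < i →
              lv.getD k 0 = PySem.List.pyGetD lv ((i:Int) - line) 0 ∧ visited.getD k false = false := by
            intro k hk1 hk2
            have hks : s ≤ ((i:Int) - line).toNat := by omega
            have hvi2 : PySem.List.pyGetD lv ((i:Int) - line) 0 = lv.getD s 0 := by
              rw [PySem.List.pyGetD_eq_getElem lv 0 (by omega) (by push_cast; omega),
                  ← List.getD_eq_getElem lv 0 (by omega : ((i:Int) - line).toNat < lv.length)]
              exact h2 _ hks (by omega)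
            refine ⟨by rw [hvi2]; exact h2 k (by omega) hk2, h6 k (by omega)⟩
          obtain ⟨v', heq, hvlen, hsame, htrue⟩ :=
            pvA_asc_ok lv (PySem.List.pyGetD lv ((i:Int) - line) 0) i (((i:Int) - line).toNat) visited hvi
          rw [heq]
          have hrec := ih (i+1) i 0 v' (by omega) (by omega) (by omega) (by omega)
            (by intro j hj1 hj2; have : j = i := by omega
                rw [this])
            (by right; rw [hprev]; omega)
            (by rw [hvlen, hlen])
            (by left
                refine ⟨rfl, ?_⟩
                rw [hprev]
                omega)
            (by intro j hj
                have hij : i ≤ j := by omega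
                rw [hsame j (by right; omega)]
                refine h6 j ?_
                omega)
            (by intro j hj1 hj2; omega)
          show pvA_main lv line (i+1) v' = _
          rw [hrec]
          have e1 : ((i+1 : Nat) : Int) - (i : Int) = 1 := by push_cast; ring
          have e2 : i + 1 - 1 = i := by omega
          rw [e1, e2]

-- top-level assembly
theorem pv_equiv (lv : List Int) (line : Int) (hpre : Pre_is_true lv line) :
    is_true lv line = is_true_alt lv line := by
  obtain ⟨hne, -⟩ := hpre
  obtain ⟨x, rest, rfl⟩ : ∃ x rest, lv = x :: rest := by
    cases lv with
    | nil => exact absurd rfl hne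
    | cons x rest => exact ⟨x, rest, rfl⟩
  rw [is_true, PySem.List.pyGet?_zero_cons]
  simp only
  by_cases hall : ∀ b ∈ (x :: rest), b = x
  · rw [if_pos]
    · rw [is_true_alt]
      symm
      simpa using (pvB_loop_allEq line rest x 1 0 (fun y hy => hall y (by simp [hy])) (by omega))
    · rw [PySem.List.count_eq, List.count_eq_length.mpr (fun b hb => (hall b hb).symm)]
  · rw [if_neg (by
      rw [PySem.List.count_eq]
      intro hcon
      exact hall (fun b hb => (List.count_eq_length.mp hcon b hb).symm))]
    by_cases hch : List.IsChain (fun a b => (b - a).natAbs ≤ 1) (x :: rest)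
    · have hdiffs := (pv_chain_iff (x :: rest)).mp hch
      rw [if_neg (by
        rw [(pvA_diffLoop_iff (x :: rest) 1).mpr (fun j hj1 hj2 => hdiffs j (by omega) hj2)]
        simp)]
      by_cases hl : 0 ≤ line
      · have hmain := pvMain (x :: rest) line hl hdiffs ((x :: rest).length) 1 0 0
          (List.replicate (x :: rest).length false)
          (by omega) (by omega) (by omega) (by simp)
          (by intro j hj1 hj2; have : j = 0 := by omega
              rw [this])
          (Or.inl rfl)
          (by simp)
          (Or.inl ⟨rfl, by omega⟩)
          (by intro j hj; exact pv_getD_replicate _ _)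
          (by intro j hj1 hj2; omega)
        rw [hmain, is_true_alt]
        norm_num
      · push_neg at hl
        rw [pvA_main_neg (x :: rest) line hl 1 _, is_true_alt]
        symm
        exact pvB_loop_neg line hl rest x 1 0 (le_refl 0) (by omega) hch
    · rw [if_pos (by
        rcases Bool.eq_false_or_eq_true (pvA_diffLoop (x :: rest) 1) with htr | hfl
        · exact absurd (fun j hj1 hj2 => ((pvA_diffLoop_iff (x :: rest) 1).mp htr) j (by omega) hj2)
            (by intro hcon
                exact hch ((pv_chain_iff (x :: rest)).mpr (by
                  intro j hj0 hj; exact hcon j (by omega) hj)))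
        · exact hfl)]
      rw [is_true_alt]
      symm
      exact pvB_loop_chain_false line rest x 1 0 hch

-- ===== VERDICT (by name: the statement is the Claim_ definition above) =====
theorem is_true_spec : Claim_equal_is_true := by
  intro list_value line _hdom hpre
  unfold Spec_is_true
  exact pv_equiv list_value line hpre
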